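-- pv_equiv track=rewrite | github.com/juy4556/PythonAlgorithm | 프로그래머스/표현 가능한 이진트리.py | divide_and_check
-- ===== SOURCE A (Python) =====
-- def divide_and_check(mid, arr):
--     left = arr[:mid]
--     right = arr[mid + 1:]
--
--     if arr[mid] == '0':
--         l, r = left[len(left) // 2], right[len(right) // 2]
--         if l == '1' or r == '1':
--             return False
--     if len(left) >= 2:
--         if not divide_and_check(len(left) // 2, left):
--             return False
--         if not divide_and_check(len(right) // 2, right):
--             return False
--     return True
-- ===== SOURCE B (Python) =====
-- def divide_and_check(mid, arr):
--     # Order-free reformulation: which nodes the recursion visits depends only on lengths,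
--     # never on characters, so scan the whole decomposition with a BFS worklist and AND
--     # together every node's local '0'-rule (centre '0' forbids a child centre '1').
--     def half(t):
--         return len(t) // 2
--
--     def ctr(t):
--         return t[half(t)] if t else None
--
--     def ok(c, left, right):
--         return c != '0' or '1' not in (ctr(left), ctr(right))
--
--     root_left, root_right = arr[:mid], arr[mid + 1:]
--     result = ok(arr[mid], root_left, root_right)
--     segs = [root_left, root_right] if len(root_left) >= 2 else []
--     i = 0
--     while i < len(segs):
--         t = segs[i]
--         i += 1
--         left, right = t[:half(t)], t[half(t) + 1:]
--         result = result and ok(ctr(t), left, right)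
--         if len(left) >= 2:
--             segs.append(left)
--             segs.append(right)
--     return result
-- ===== Notes on version B (the rewrite author's own statement) =====
-- stated objective: alternative
-- what changed: Replaces A's short-circuiting preorder recursion by a two-phase order-free check: a BFS worklist scans the character-independent node set of the midpoint decomposition and ANDs every node's local '0'-rule, with None-safe centre lookups for the fixed-shape inner nodes.
import Mathlib
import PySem

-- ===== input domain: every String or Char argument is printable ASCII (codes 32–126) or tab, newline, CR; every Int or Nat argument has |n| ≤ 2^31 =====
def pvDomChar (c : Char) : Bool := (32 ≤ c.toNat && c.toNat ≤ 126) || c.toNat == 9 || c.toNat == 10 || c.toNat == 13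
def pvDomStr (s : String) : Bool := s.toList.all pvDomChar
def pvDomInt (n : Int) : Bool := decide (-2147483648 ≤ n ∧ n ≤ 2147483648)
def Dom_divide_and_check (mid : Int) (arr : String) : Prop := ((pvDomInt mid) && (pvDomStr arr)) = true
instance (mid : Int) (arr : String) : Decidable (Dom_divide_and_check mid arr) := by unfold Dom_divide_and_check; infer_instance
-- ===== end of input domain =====

-- B replaces A's short-circuiting preorder recursion by a two-phase order-free check: a
-- BFS worklist scans the (character-independent) node set of the midpoint decomposition
-- and ANDs every node's local '0'-rule ("alternative", not faster).

-- shared shape helpers: the two child slices s[:m] and s[m+1:], and len(t)//2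
def pvLeft (m : Int) (s : List Char) : List Char := PySem.List.slice s none (some m)
def pvRight (m : Int) (s : List Char) : List Char := PySem.List.slice s (some (m + 1)) none
def pvHalf (t : List Char) : Int := PySem.Int.floordiv (PySem.List.len t) 2

-- depth measure of a node; the fuel arguments below are only recursion bounds
-- (A's call depth below (m, s) is at most pvMu m s; B's loop runs at most 2 * 3 ^ (2 len) times)
def pvMu (m : Int) (s : List Char) : Nat :=
  2 * s.length + (if m < 0 ∨ (s.length : Int) ≤ m then 1 else 0)

-- ===== PORT A =====
-- literal port of A's recursion; `none` from pyGet? is Python's IndexError, rendered as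
-- `false` (exactly those inputs are excluded by Pre_); the Nat argument is fuel ≥ call depth
def pvRec : Nat → Int → List Char → Bool
  | 0, _, _ => false               -- never reached: fuel exceeds the call depth
  | fuel + 1, m, s =>
    match PySem.List.pyGet? s m with
    | none => false                -- arr[mid] raises IndexError
    | some c =>
      let viol : Bool :=
        if c = '0' then
          match PySem.List.pyGet? (pvLeft m s) (pvHalf (pvLeft m s)),
                PySem.List.pyGet? (pvRight m s) (pvHalf (pvRight m s)) with
          | some l, some r => l == '1' || r == '1'
          | _, _ => true           -- left[...] / right[...] raises IndexError
        else false
      if viol then false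
      else if (2 : Int) ≤ PySem.List.len (pvLeft m s) then
        if pvRec fuel (pvHalf (pvLeft m s)) (pvLeft m s) = false then false
        else if pvRec fuel (pvHalf (pvRight m s)) (pvRight m s) = false then false
        else true
      else true

def divide_and_check (mid : Int) (arr : String) : Bool :=
  pvRec (pvMu mid arr.toList + 1) mid arr.toList

-- ===== PORT B =====
-- Source B's helpers: ctr(t) = t[len(t)//2] if t else None, and the local '0'-rule
-- ok(c, left, right) = c != '0' or '1' not in (ctr(left), ctr(right))
def pvCtr (t : List Char) : Option Char :=
  if t ≠ [] then PySem.List.pyGet? t (pvHalf t) else none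
def pvOk (c : Option Char) (left right : List Char) : Bool :=
  !(c == some '0') || !([pvCtr left, pvCtr right].contains (some '1'))

-- Source B's while loop: segs is the still-unscanned suffix of the worklist, res the running
-- conjunction; each step ANDs one node's rule and appends its two children when
-- len(left) >= 2; the Nat argument is fuel ≥ the number of iterations
def pvLoop : Nat → List (List Char) → Bool → Bool
  | 0, _, res => res               -- never reached: fuel exceeds the iteration count
  | _ + 1, [], res => res
  | fuel + 1, t :: rest, res =>
    pvLoop fuel
      (if (2 : Int) ≤ PySem.List.len (pvLeft (pvHalf t) t) then
          rest ++ [pvLeft (pvHalf t) t, pvRight (pvHalf t) t]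
        else rest)
      (res && pvOk (pvCtr t) (pvLeft (pvHalf t) t) (pvRight (pvHalf t) t))

def divide_and_check_alt (mid : Int) (arr : String) : Bool :=
  match PySem.List.pyGet? arr.toList mid with
  | none => false                  -- arr[mid] raises IndexError (outside Pre_)
  | some c =>
    pvLoop (2 * 3 ^ (2 * arr.toList.length) + 1)
      (if (2 : Int) ≤ PySem.List.len (pvLeft mid arr.toList) then
          [pvLeft mid arr.toList, pvRight mid arr.toList]
        else [])
      (pvOk (some c) (pvLeft mid arr.toList) (pvRight mid arr.toList))

-- ===== PRECONDITION & SPEC =====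
-- shape predicates on one node (m, s) of the midpoint decomposition:
-- pvDanger: A's indexing raises at this node (bad own index, or centre '0' with an empty child)
def pvDanger (m : Int) (s : List Char) : Bool :=
  match PySem.List.pyGet? s m with
  | none => true
  | some c => c == '0' && ((pvLeft m s).isEmpty || (pvRight m s).isEmpty)
-- pvViol: the node breaks the '0'-rule (centre '0', both child centres exist, one is '1')
def pvViol (m : Int) (s : List Char) : Bool :=
  match PySem.List.pyGet? s m with
  | none => false
  | some c => c == '0' && !(pvLeft m s).isEmpty && !(pvRight m s).isEmpty
      && [pvCtr (pvLeft m s), pvCtr (pvRight m s)].contains (some '1')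

-- all nodes of the decomposition below (m, s) (children exist iff len(left) >= 2)
def pvNodes : Nat → Int → List Char → List (Int × List Char)
  | 0, _, _ => []                  -- never reached: fuel exceeds the tree depth
  | fuel + 1, m, s =>
    (m, s) :: (if (2 : Int) ≤ PySem.List.len (pvLeft m s) then
        pvNodes fuel (pvHalf (pvLeft m s)) (pvLeft m s)
          ++ pvNodes fuel (pvHalf (pvRight m s)) (pvRight m s)
      else [])

-- Pre_ holds exactly on the inputs where A raises no IndexError: no dangerous node is
-- reached — a violating node ends the run before its subtrees, and after a violation-free
-- left subtree the right subtree must be raise-free too.  This is the exact raise set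
-- (every input A returns on satisfies Pre_, and A raises on every excluded input); it is a
-- property of the input's decomposition-tree shape only: pvSafe looks at the local
-- danger/violation status of each node and computes neither program's result.
def pvSafe : Nat → Int → List Char → Bool
  | 0, _, _ => false               -- never reached: fuel exceeds the tree depth
  | fuel + 1, m, s =>
    if pvDanger m s then false
    else if pvViol m s then true
    else if (2 : Int) ≤ PySem.List.len (pvLeft m s) then
      pvSafe fuel (pvHalf (pvLeft m s)) (pvLeft m s)
        && ((pvNodes fuel (pvHalf (pvLeft m s)) (pvLeft m s)).any (fun n => pvViol n.1 n.2)
            || pvSafe fuel (pvHalf (pvRight m s)) (pvRight m s))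
    else true

def Pre_divide_and_check (mid : Int) (arr : String) : Prop :=
  pvSafe (pvMu mid arr.toList + 1) mid arr.toList = true
instance (mid : Int) (arr : String) : Decidable (Pre_divide_and_check mid arr) := by
  unfold Pre_divide_and_check; infer_instance

def pvWitness_divide_and_check : Int × String := (3, "0110111")

def Spec_divide_and_check (mid : Int) (arr : String) (out : Bool) : Prop := out = divide_and_check_alt mid arr
instance (mid : Int) (arr : String) (out : Bool) : Decidable (Spec_divide_and_check mid arr out) := by unfold Spec_divide_and_check; infer_instance

-- ===== CLAIM (what is proved, stated in full; the proofs are below) =====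
def Claim_equal_divide_and_check : Prop := ∀ (mid : Int) (arr : String), Dom_divide_and_check mid arr → Pre_divide_and_check mid arr → Spec_divide_and_check mid arr (divide_and_check mid arr)

-- ===== LEMMAS AND PROOFS =====

-- B's per-node test, phrased on a node (m, s); at every node the worklist reaches,
-- m = pvHalf s, where it coincides with Source B's ok(ctr(t), ...) (pvCtr_get below)
def pvNodeCheck (m : Int) (s : List Char) : Bool :=
  pvOk (PySem.List.pyGet? s m) (pvLeft m s) (pvRight m s)

-- weight of a worklist: bounds the number of iterations B's loop still performs
def pvWS (segs : List (List Char)) : Nat := (segs.map fun t => 3 ^ pvMu (pvHalf t) t).sum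

theorem pvLen_left (m : Int) (s : List Char) :
    (pvLeft m s).length = PySem.List.clampIdx s.length m := by
  have h := PySem.List.clampIdx_le s.length m
  simp [pvLeft, PySem.List.slice]

theorem pvLen_right (m : Int) (s : List Char) :
    (pvRight m s).length = s.length - PySem.List.clampIdx s.length (m + 1) := by
  simp [pvRight, PySem.List.slice]

theorem pvHalf_eq (t : List Char) : pvHalf t = ((t.length / 2 : Nat) : Int) := by
  simp only [pvHalf, PySem.Int.floordiv, PySem.List.len]
  rw [Int.fdiv_eq_ediv]
  simp

theorem pvMu_child (t : List Char) :
    pvMu (pvHalf t) t = if t = [] then 1 else 2 * t.length := by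
  rw [pvHalf_eq]
  rcases t with _ | ⟨c, ts⟩
  · simp [pvMu]
  · rw [if_neg (by simp)]
    have hlt : (c :: ts).length / 2 < (c :: ts).length := Nat.div_lt_self (by simp) (by omega)
    have hcond : ¬((((c :: ts).length / 2 : Nat) : Int) < 0 ∨
        ((c :: ts).length : Int) ≤ (((c :: ts).length / 2 : Nat) : Int)) := by push_cast; omega
    rw [pvMu, if_neg hcond]
    omega

theorem pvMuL_lt (m : Int) (s : List Char) (h : (2 : Int) ≤ PySem.List.len (pvLeft m s)) :
    pvMu (pvHalf (pvLeft m s)) (pvLeft m s) < pvMu m s := by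
  rw [pvMu_child]
  have hl := pvLen_left m s
  have hc := PySem.List.clampIdx_le s.length m
  simp only [PySem.List.len_eq] at h
  rw [if_neg (by intro he; rw [he] at h; simp at h)]
  simp only [pvMu, PySem.List.clampIdx] at *
  split_ifs at * <;> omega

theorem pvMuR_lt (m : Int) (s : List Char) (h : (2 : Int) ≤ PySem.List.len (pvLeft m s)) :
    pvMu (pvHalf (pvRight m s)) (pvRight m s) < pvMu m s := by
  rw [pvMu_child]
  have hl := pvLen_left m s
  have hr := pvLen_right m s
  have hc := PySem.List.clampIdx_le s.length m
  have hc' := PySem.List.clampIdx_le s.length (m + 1)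
  simp only [PySem.List.len_eq] at h
  by_cases he : pvRight m s = []
  · rw [if_pos he]
    simp only [pvMu, PySem.List.clampIdx] at *
    split_ifs at * <;> omega
  · rw [if_neg he]
    have hrne : 0 < (pvRight m s).length := List.length_pos_iff.mpr he
    simp only [pvMu, PySem.List.clampIdx] at *
    split_ifs at * <;> omega

theorem pvPow_lt {a b c : Nat} (ha : a < c) (hb : b < c) : 3 ^ a + 3 ^ b < 3 ^ c := by
  have h1 : 3 ^ a ≤ 3 ^ (c - 1) := Nat.pow_le_pow_right (by norm_num) (by omega)
  have h2 : 3 ^ b ≤ 3 ^ (c - 1) := Nat.pow_le_pow_right (by norm_num) (by omega)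
  have h3 : 3 ^ c = 3 ^ (c - 1) * 3 := by rw [← pow_succ]; congr 1; omega
  have h4 : 1 ≤ 3 ^ (c - 1) := Nat.one_le_pow _ _ (by norm_num)
  omega

theorem pvWS_step (t : List Char) (rest : List (List Char))
    (h : (2 : Int) ≤ PySem.List.len (pvLeft (pvHalf t) t)) :
    pvWS (rest ++ [pvLeft (pvHalf t) t, pvRight (pvHalf t) t]) < pvWS (t :: rest) := by
  have h3 := pvPow_lt (pvMuL_lt (pvHalf t) t h) (pvMuR_lt (pvHalf t) t h)
  simp only [pvWS, List.map_append, List.map_cons, List.sum_append, List.sum_cons, List.map_nil,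
    List.sum_nil]
  omega

theorem pvWS_tail (t : List Char) (rest : List (List Char)) : pvWS rest < pvWS (t :: rest) := by
  have : 0 < 3 ^ pvMu (pvHalf t) t := Nat.pow_pos (by norm_num)
  simp only [pvWS, List.map_cons, List.sum_cons]
  omega

-- ctr(t) is exactly the (total) centre lookup t[len(t)//2], also for empty t
theorem pvCtr_get (t : List Char) : pvCtr t = PySem.List.pyGet? t (pvHalf t) := by
  unfold pvCtr
  split_ifs with h
  · rfl
  · rw [not_not] at h
    subst h
    symm
    rw [PySem.List.pyGet?_eq_none_iff, PySem.Raise.InRange, pvHalf_eq]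
    simp

theorem pvCtr_some (t : List Char) (h : t ≠ []) : ∃ c, pvCtr t = some c := by
  rw [pvCtr_get, pvHalf_eq, PySem.List.pyGet?_natCast]
  have hlt : t.length / 2 < t.length :=
    Nat.div_lt_self (List.length_pos_iff.mpr h) (by norm_num)
  exact ⟨t[t.length / 2], by simp [List.getElem?_eq_getElem hlt]⟩

-- a violating node fails B's per-node test
theorem pvViol_check (m : Int) (s : List Char) (h : pvViol m s = true) :
    pvNodeCheck m s = false := by
  unfold pvViol at h
  unfold pvNodeCheck pvOk
  cases hg : PySem.List.pyGet? s m with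
  | none => rw [hg] at h; simp at h
  | some c =>
    rw [hg] at h
    simp only [Bool.and_eq_true, beq_iff_eq] at h
    obtain ⟨⟨⟨hc, _⟩, _⟩, hcon⟩ := h
    subst hc
    rw [hcon]
    simp

-- a clean node (no danger, no violation) passes B's per-node test
theorem pvClean_check (m : Int) (s : List Char)
    (hd : pvDanger m s = false) (hv : pvViol m s = false) :
    pvNodeCheck m s = true := by
  unfold pvDanger at hd
  unfold pvViol at hv
  unfold pvNodeCheck pvOk
  cases hg : PySem.List.pyGet? s m with
  | none => rw [hg] at hd; simp at hd
  | some c =>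
    rw [hg] at hd hv
    by_cases hc : c = '0'
    · subst hc
      simp only [beq_self_eq_true, Bool.true_and] at hd hv
      rw [Bool.or_eq_false_iff] at hd
      simp only [hd.1, hd.2, Bool.not_false, Bool.true_and] at hv
      rw [hv]
      simp
    · simp [hc]

-- if every node of a subtree passes B's test, no node of it violates
theorem pvAll_no_viol (f : Nat) (m : Int) (s : List Char)
    (h : (pvNodes f m s).all (fun n => pvNodeCheck n.1 n.2) = true) :
    (pvNodes f m s).any (fun n => pvViol n.1 n.2) = false := by
  rw [List.all_eq_true] at h
  rw [List.any_eq_false]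
  intro n hn hv
  have h1 := h n hn
  have h2 := pvViol_check n.1 n.2 hv
  simp_all

-- the pvRec violation flag equals pvViol at non-dangerous nodes
theorem pvFlag_eq (m : Int) (s : List Char) (c : Char)
    (hd : pvDanger m s = false) (hg : PySem.List.pyGet? s m = some c) :
    (if c = '0' then
        (match PySem.List.pyGet? (pvLeft m s) (pvHalf (pvLeft m s)),
               PySem.List.pyGet? (pvRight m s) (pvHalf (pvRight m s)) with
         | some l, some r => l == '1' || r == '1'
         | _, _ => true)
      else false) = pvViol m s := by
  unfold pvDanger at hd
  unfold pvViol
  rw [hg] at hd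
  rw [hg]
  by_cases hc : c = '0'
  · subst hc
    simp only [beq_self_eq_true, Bool.true_and] at hd ⊢
    rw [Bool.or_eq_false_iff] at hd
    have hLne : pvLeft m s ≠ [] := by
      simpa [List.isEmpty_iff] using hd.1
    have hRne : pvRight m s ≠ [] := by
      simpa [List.isEmpty_iff] using hd.2
    obtain ⟨c1, h1⟩ := pvCtr_some _ hLne
    obtain ⟨c2, h2⟩ := pvCtr_some _ hRne
    rw [if_pos trivial, ← pvCtr_get, ← pvCtr_get, h1, h2]
    rw [hd.1, hd.2]
    simp only [Bool.not_false, Bool.true_and, List.contains_cons, List.contains_nil,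
      Bool.or_false]
    have hsym : ∀ a : Char, (a == '1') = ('1' == a) := by
      intro a
      by_cases h : a = '1'
      · simp [h]
      · simp [h, Ne.symm h]
    rw [hsym c1, hsym c2]
    simp
  · simp [hc]

-- the node list does not depend on the fuel once the fuel exceeds the depth
theorem pvNodes_irrel : ∀ (k f g : Nat) (m : Int) (s : List Char),
    pvMu m s < f → pvMu m s < g → pvMu m s < k →
    pvNodes f m s = pvNodes g m s := by
  intro k
  induction k using Nat.strong_induction_on with
  | _ k IH =>
  intro f g m s hf hg hk
  match f, g with
  | f + 1, g + 1 =>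
    rw [pvNodes, pvNodes]
    by_cases h2 : (2 : Int) ≤ PySem.List.len (pvLeft m s)
    · rw [if_pos h2, if_pos h2]
      have hL := pvMuL_lt m s h2
      have hR := pvMuR_lt m s h2
      rw [IH (pvMu m s) hk f g _ _ (by omega) (by omega) hL,
          IH (pvMu m s) hk f g _ _ (by omega) (by omega) hR]
    · rw [if_neg h2, if_neg h2]

-- A's recursion agrees with the order-free "all nodes clean" test on every safe input
theorem pvRec_eq_all : ∀ (k f g e : Nat) (m : Int) (s : List Char),
    pvMu m s < f → pvMu m s < g → pvMu m s < e → pvMu m s < k →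
    pvSafe e m s = true →
    pvRec f m s = (pvNodes g m s).all (fun n => pvNodeCheck n.1 n.2) := by
  intro k
  induction k using Nat.strong_induction_on with
  | _ k IH =>
  intro f g e m s hf hg he hk hsafe
  match f, g, e with
  | f + 1, g + 1, e + 1 =>
  rw [pvSafe] at hsafe
  by_cases hd : pvDanger m s = true
  · rw [if_pos hd] at hsafe; exact absurd hsafe (by simp)
  rw [Bool.not_eq_true] at hd
  rw [if_neg (by simp [hd])] at hsafe
  obtain ⟨c, hcg⟩ : ∃ c, PySem.List.pyGet? s m = some c := by
    unfold pvDanger at hd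
    cases hgg : PySem.List.pyGet? s m with
    | none => rw [hgg] at hd; simp at hd
    | some c => exact ⟨c, rfl⟩
  rw [pvRec, hcg]
  simp only [pvFlag_eq m s c hd hcg]
  rw [pvNodes]
  by_cases hv : pvViol m s = true
  · rw [if_pos hv]
    simp [pvViol_check m s hv]
  rw [Bool.not_eq_true] at hv
  rw [if_neg (by simp [hv])] at hsafe
  rw [if_neg (by simp [hv])]
  by_cases h2 : (2 : Int) ≤ PySem.List.len (pvLeft m s)
  · rw [if_pos h2] at hsafe ⊢
    rw [if_pos h2]
    simp only [Bool.and_eq_true, Bool.or_eq_true] at hsafe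
    obtain ⟨hsL, hOr⟩ := hsafe
    have hmuL := pvMuL_lt m s h2
    have hmuR := pvMuR_lt m s h2
    have hL := IH (pvMu m s) hk f g e _ _ (by omega) (by omega) (by omega) hmuL hsL
    by_cases hrl : pvRec f (pvHalf (pvLeft m s)) (pvLeft m s) = false
    · rw [if_pos hrl]
      rw [hrl] at hL
      simp [pvClean_check m s hd hv, ← hL]
    · rw [if_neg hrl]
      rw [Bool.not_eq_false] at hrl
      have hLall : (pvNodes g (pvHalf (pvLeft m s)) (pvLeft m s)).all
          (fun n => pvNodeCheck n.1 n.2) = true := by rw [← hL]; exact hrl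
      have hnv := pvAll_no_viol g _ _ hLall
      have hsR : pvSafe e (pvHalf (pvRight m s)) (pvRight m s) = true := by
        rcases hOr with h | h
        · rw [pvNodes_irrel (pvMu m s) e g _ _ (by omega) (by omega) hmuL] at h
          rw [hnv] at h; simp at h
        · exact h
      have hR := IH (pvMu m s) hk f g e _ _ (by omega) (by omega) (by omega) hmuR hsR
      rw [List.all_cons, List.all_append]
      rw [pvClean_check m s hd hv, hLall, ← hR]
      cases pvRec f (pvHalf (pvRight m s)) (pvRight m s) <;> simp
  · rw [if_neg h2] at hsafe ⊢
    rw [if_neg h2]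
    simp [pvClean_check m s hd hv]

-- B's worklist loop ANDs res with the tests of every node below every queued segment
theorem pvLoop_all : ∀ (k f : Nat) (segs : List (List Char)) (res : Bool),
    pvWS segs < f → pvWS segs < k →
    pvLoop f segs res
      = (res && segs.all (fun t => (pvNodes (pvMu (pvHalf t) t + 1) (pvHalf t) t).all
          (fun n => pvNodeCheck n.1 n.2))) := by
  intro k
  induction k using Nat.strong_induction_on with
  | _ k IH =>
  intro f segs res hf hk
  match f, segs with
  | f + 1, [] => rw [pvLoop]; simp
  | f + 1, t :: rest =>
    rw [pvLoop]
    have hwt := pvWS_tail t rest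
    rw [List.all_cons]
    by_cases h2 : (2 : Int) ≤ PySem.List.len (pvLeft (pvHalf t) t)
    · rw [if_pos h2]
      have hws := pvWS_step t rest h2
      rw [IH (pvWS (t :: rest)) hk f _ _ (by omega) hws]
      have hmuL := pvMuL_lt (pvHalf t) t h2
      have hmuR := pvMuR_lt (pvHalf t) t h2
      rw [List.all_append, List.all_cons, List.all_cons, List.all_nil]
      conv_rhs => rw [pvNodes]
      rw [if_pos h2, List.all_cons, List.all_append]
      rw [pvNodes_irrel (pvMu (pvHalf t) t + 1)
            (pvMu (pvHalf (pvLeft (pvHalf t) t)) (pvLeft (pvHalf t) t) + 1) (pvMu (pvHalf t) t)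
            _ _ (by omega) (by omega) (by omega),
          pvNodes_irrel (pvMu (pvHalf t) t + 1)
            (pvMu (pvHalf (pvRight (pvHalf t) t)) (pvRight (pvHalf t) t) + 1) (pvMu (pvHalf t) t)
            _ _ (by omega) (by omega) (by omega)]
      rw [pvCtr_get t]
      have hck : pvOk (PySem.List.pyGet? t (pvHalf t)) (pvLeft (pvHalf t) t) (pvRight (pvHalf t) t)
          = pvNodeCheck (pvHalf t) t := rfl
      rw [hck]
      cases res <;> cases pvNodeCheck (pvHalf t) t <;>
        cases (pvNodes (pvMu (pvHalf t) t) (pvHalf (pvLeft (pvHalf t) t)) (pvLeft (pvHalf t) t)).all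
            (fun n => pvNodeCheck n.1 n.2) <;>
        cases (pvNodes (pvMu (pvHalf t) t) (pvHalf (pvRight (pvHalf t) t)) (pvRight (pvHalf t) t)).all
            (fun n => pvNodeCheck n.1 n.2) <;>
        cases rest.all (fun t => (pvNodes (pvMu (pvHalf t) t + 1) (pvHalf t) t).all
            (fun n => pvNodeCheck n.1 n.2)) <;> rfl
    · rw [if_neg h2]
      rw [IH (pvWS (t :: rest)) hk f rest _ (by omega) hwt]
      conv_rhs => rw [pvNodes]
      rw [if_neg h2, List.all_cons, List.all_nil]
      rw [pvCtr_get t]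
      have hck : pvOk (PySem.List.pyGet? t (pvHalf t)) (pvLeft (pvHalf t) t) (pvRight (pvHalf t) t)
          = pvNodeCheck (pvHalf t) t := rfl
      rw [hck]
      cases res <;> cases pvNodeCheck (pvHalf t) t <;>
        cases rest.all (fun t => (pvNodes (pvMu (pvHalf t) t + 1) (pvHalf t) t).all
            (fun n => pvNodeCheck n.1 n.2)) <;> rfl

-- the child measures are bounded by 2 * len(s), so the loop's fuel suffices
theorem pvMu_child_le (m : Int) (s : List Char)
    (h : (2 : Int) ≤ PySem.List.len (pvLeft m s)) :
    pvMu (pvHalf (pvLeft m s)) (pvLeft m s) ≤ 2 * s.length ∧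
    pvMu (pvHalf (pvRight m s)) (pvRight m s) ≤ 2 * s.length := by
  have hl := pvLen_left m s
  have hr := pvLen_right m s
  have hc := PySem.List.clampIdx_le s.length m
  have hc' := PySem.List.clampIdx_le s.length (m + 1)
  simp only [PySem.List.len_eq] at h
  constructor
  · rw [pvMu_child, if_neg (by intro he; rw [he] at h; simp at h)]
    omega
  · rw [pvMu_child]
    split_ifs with he
    · omega
    · have : 0 < (pvRight m s).length := List.length_pos_iff.mpr he
      omega

-- unfolding of B's entry point once arr[mid] is known to exist
theorem pvAlt_some (mid : Int) (arr : String) (c : Char)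
    (hcg : PySem.List.pyGet? arr.toList mid = some c) :
    divide_and_check_alt mid arr
      = pvLoop (2 * 3 ^ (2 * arr.toList.length) + 1)
          (if (2 : Int) ≤ PySem.List.len (pvLeft mid arr.toList) then
              [pvLeft mid arr.toList, pvRight mid arr.toList]
            else [])
          (pvOk (some c) (pvLeft mid arr.toList) (pvRight mid arr.toList)) := by
  unfold divide_and_check_alt
  rw [hcg]

-- ===== VERDICT (by name: the statement is the Claim_ definition above) =====
theorem divide_and_check_spec : Claim_equal_divide_and_check := by
  unfold Claim_equal_divide_and_check
  intro mid arr _ hpre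
  unfold Spec_divide_and_check divide_and_check
  rw [pvRec_eq_all (pvMu mid arr.toList + 1) (pvMu mid arr.toList + 1)
       (pvMu mid arr.toList + 1) (pvMu mid arr.toList + 1) mid arr.toList
       (by omega) (by omega) (by omega) (by omega) hpre]
  obtain ⟨c, hcg⟩ : ∃ c, PySem.List.pyGet? arr.toList mid = some c := by
    unfold Pre_divide_and_check at hpre
    rw [pvSafe] at hpre
    by_cases hd : pvDanger mid arr.toList = true
    · rw [if_pos hd] at hpre; exact absurd hpre (by simp)
    · rw [Bool.not_eq_true] at hd
      unfold pvDanger at hd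
      cases hgg : PySem.List.pyGet? arr.toList mid with
      | none => rw [hgg] at hd; simp at hd
      | some c => exact ⟨c, rfl⟩
  rw [pvAlt_some mid arr c hcg]
  conv_lhs => rw [pvNodes]
  by_cases h2 : (2 : Int) ≤ PySem.List.len (pvLeft mid arr.toList)
  · have hb := pvMu_child_le mid arr.toList h2
    have hp1 : 3 ^ pvMu (pvHalf (pvLeft mid arr.toList)) (pvLeft mid arr.toList)
        ≤ 3 ^ (2 * arr.toList.length) := Nat.pow_le_pow_right (by norm_num) hb.1
    have hp2 : 3 ^ pvMu (pvHalf (pvRight mid arr.toList)) (pvRight mid arr.toList)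
        ≤ 3 ^ (2 * arr.toList.length) := Nat.pow_le_pow_right (by norm_num) hb.2
    rw [if_pos h2, if_pos h2]
    rw [pvLoop_all (pvWS [pvLeft mid arr.toList, pvRight mid arr.toList] + 1)
         (2 * 3 ^ (2 * arr.toList.length) + 1) _ _
         (by simp only [pvWS, List.map_cons, List.map_nil, List.sum_cons, List.sum_nil]; omega)
         (by omega)]
    have eL : pvNodes (pvMu (pvHalf (pvLeft mid arr.toList)) (pvLeft mid arr.toList) + 1)
          (pvHalf (pvLeft mid arr.toList)) (pvLeft mid arr.toList)
        = pvNodes (pvMu mid arr.toList) (pvHalf (pvLeft mid arr.toList)) (pvLeft mid arr.toList) :=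
      pvNodes_irrel (pvMu mid arr.toList + 1) _ _ _ _
        (by omega) (by exact pvMuL_lt mid arr.toList h2)
        (by have := pvMuL_lt mid arr.toList h2; omega)
    have eR : pvNodes (pvMu (pvHalf (pvRight mid arr.toList)) (pvRight mid arr.toList) + 1)
          (pvHalf (pvRight mid arr.toList)) (pvRight mid arr.toList)
        = pvNodes (pvMu mid arr.toList) (pvHalf (pvRight mid arr.toList)) (pvRight mid arr.toList) :=
      pvNodes_irrel (pvMu mid arr.toList + 1) _ _ _ _
        (by omega) (by exact pvMuR_lt mid arr.toList h2)
        (by have := pvMuR_lt mid arr.toList h2; omega)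
    have hroot : pvOk (some c) (pvLeft mid arr.toList) (pvRight mid arr.toList)
        = pvNodeCheck mid arr.toList := by
      unfold pvNodeCheck
      rw [hcg]
    simp only [List.all_cons, List.all_nil, List.all_append, eL, eR, hroot, Bool.and_true]
  · rw [if_neg h2, if_neg h2]
    rw [pvLoop_all 1 (2 * 3 ^ (2 * arr.toList.length) + 1) [] _
         (by simp only [pvWS, List.map_nil, List.sum_nil]; omega)
         (by simp only [pvWS, List.map_nil, List.sum_nil]; omega)]
    have hroot : pvOk (some c) (pvLeft mid arr.toList) (pvRight mid arr.toList)
        = pvNodeCheck mid arr.toList := by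
      unfold pvNodeCheck
      rw [hcg]
    simp [hroot]
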